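-- pv_equiv track=rewrite | github.com/shinob/voice-api | main.py | _parse_knowledge_entries
-- ===== SOURCE A (Python) =====
-- def _parse_knowledge_entries(content: str) -> list[dict]:
--     """knowledge.txt をエントリごとに分割"""
--     entries = []
--     current_name = None
--     current_lines = []
--
--     for line in content.splitlines():
--         # 行頭が非空白で始まり:で終わる → 新エントリの開始
--         if line and not line[0].isspace() and line.rstrip().endswith(":"):
--             if current_name and current_lines:
--                 entries.append({
--                     "name": current_name,
--                     "text": f"{current_name}:\n" + "\n".join(current_lines),
--                 })
--             current_name = line.rstrip().rstrip(":")
--             current_lines = []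
--         elif current_name is not None:
--             current_lines.append(line)
--
--     if current_name and current_lines:
--         entries.append({
--             "name": current_name,
--             "text": f"{current_name}:\n" + "\n".join(current_lines),
--         })
--
--     return entries
-- ===== SOURCE B (Python) =====
-- def _parse_knowledge_entries(content: str) -> list[dict]:
--     """knowledge.txt split into entries: header-index table + range slicing."""
--     lines = content.splitlines()
--     heads = [(i, line.rstrip().rstrip(":"))
--              for i, line in enumerate(lines)
--              if line and not line[0].isspace() and line.rstrip().endswith(":")]
--     bounds = [i for i, _ in heads][1:] + [len(lines)]
--     return [
--         {"name": name, "text": name + ":\n" + "\n".join(lines[i + 1:end])}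
--         for (i, name), end in zip(heads, bounds)
--         if name and i + 1 < end
--     ]
-- ===== Notes on version B (the rewrite author's own statement) =====
-- stated objective: alternative
-- what changed: Replaces A's single stateful accumulate-and-emit loop (current_name/current_lines state) with a two-phase decomposition: build a table of header-line indices, then slice each body as the line range between consecutive headers.
import Mathlib
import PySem

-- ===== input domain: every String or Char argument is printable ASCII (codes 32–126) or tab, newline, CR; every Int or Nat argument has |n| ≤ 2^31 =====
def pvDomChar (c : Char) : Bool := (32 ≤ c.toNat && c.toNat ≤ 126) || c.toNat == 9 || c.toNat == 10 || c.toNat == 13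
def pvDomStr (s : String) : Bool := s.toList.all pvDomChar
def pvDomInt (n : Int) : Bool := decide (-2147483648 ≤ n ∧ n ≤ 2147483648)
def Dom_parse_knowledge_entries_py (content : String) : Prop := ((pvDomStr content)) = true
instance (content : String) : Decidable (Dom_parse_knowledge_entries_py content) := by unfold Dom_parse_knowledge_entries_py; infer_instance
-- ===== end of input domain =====

-- B replaces A's stateful accumulate-and-emit loop by a header-index table plus range
-- slicing (objective: alternative decomposition, same cost).

-- shared helpers: both Pythons test headers, compute the name and build the dict with
-- the SAME expressions, so they are factored out once.
-- header test: `line and not line[0].isspace() and line.rstrip().endswith(":")`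
def pvIsHeader (line : String) : Bool :=
  (line != "") &&
  (match PySem.Str.pyGet? line 0 with
   | some c => !PySem.Chars.isspace c
   | none => false) &&
  PySem.Str.endswith (PySem.Str.rstrip line) ":"

-- hand port of `s.rstrip(":")` (PySem has no right-only strip-with-chars): drop the
-- trailing run of ':' characters; exact for any string.
def pvRstripColons (s : String) : String :=
  String.ofList ((s.toList.reverse.dropWhile (· == ':')).reverse)

-- `line.rstrip().rstrip(":")`
def pvName (line : String) : String := pvRstripColons (PySem.Str.rstrip line)

-- `{"name": name, "text": name + ":\n" + "\n".join(body)}`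
def pvEntry (n : String) (body : List String) : List (String × String) :=
  [("name", n), ("text", n ++ ":\n" ++ PySem.Str.join "\n" body)]

-- ===== PORT A =====
-- the `entries.append(...)` block guarded by `if current_name and current_lines`
-- (written twice in A, so a helper here too)
def pvFlush (entries : List (List (String × String))) (name? : Option String)
    (cur : List String) : List (List (String × String)) :=
  match name? with
  | some n => if n ≠ "" ∧ cur ≠ [] then entries ++ [pvEntry n cur] else entries
  | none => entries

-- one iteration of A's for-loop over (entries, current_name, current_lines)
def pvStepA (st : List (List (String × String)) × Option String × List String)
    (line : String) : List (List (String × String)) × Option String × List String :=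
  if pvIsHeader line then
    (pvFlush st.1 st.2.1 st.2.2, some (pvName line), [])
  else
    match st.2.1 with
    | some _ => (st.1, st.2.1, st.2.2 ++ [line])
    | none => st

def parse_knowledge_entries_py (content : String) : List (List (String × String)) :=
  let st := (PySem.Str.splitlines content).foldl pvStepA ([], none, [])
  pvFlush st.1 st.2.1 st.2.2

-- ===== PORT B =====
-- `[(i, line.rstrip().rstrip(":")) for i, line in enumerate(lines) if <header test>]`
def pvHeads (lines : List String) : List (Int × String) :=
  (PySem.List.enumerate lines).filterMap
    (fun p => if pvIsHeader p.2 then some (p.1, pvName p.2) else none)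

-- the final list comprehension over zip(heads, bounds); `lines[i+1:end]` is a slice
def pvCollectB (lines : List String) : List (List (String × String)) :=
  let heads := pvHeads lines
  let bounds := (heads.map (·.1)).drop 1 ++ [(lines.length : Int)]
  (heads.zip bounds).flatMap (fun p =>
    if p.1.2 ≠ "" ∧ p.1.1 + 1 < p.2 then
      [pvEntry p.1.2 (PySem.List.slice lines (some (p.1.1 + 1)) (some p.2))]
    else [])

def parse_knowledge_entries_py_alt (content : String) : List (List (String × String)) :=
  pvCollectB (PySem.Str.splitlines content)

-- ===== PRECONDITION & SPEC =====
def Spec_parse_knowledge_entries_py (content : String) (out : List (List (String × String))) : Prop := out = parse_knowledge_entries_py_alt content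
instance (content : String) (out : List (List (String × String))) : Decidable (Spec_parse_knowledge_entries_py content out) := by unfold Spec_parse_knowledge_entries_py; infer_instance

-- ===== CLAIM (what is proved, stated in full; the proofs are below) =====
def Claim_equal_parse_knowledge_entries_py : Prop := ∀ (content : String), Dom_parse_knowledge_entries_py content → Spec_parse_knowledge_entries_py content (parse_knowledge_entries_py content)

-- ===== LEMMAS AND PROOFS =====

-- common specification: for each header line, its body is the non-header run right after it
def pvSpec : List String → List (List (String × String))
  | [] => []
  | l :: rest =>
    (if pvIsHeader l then
       pvFlush [] (some (pvName l)) (rest.takeWhile (fun x => !pvIsHeader x))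
     else []) ++ pvSpec rest

theorem pvFlush_append (E : List (List (String × String))) (n : String) (b : List String) :
    pvFlush E (some n) b = E ++ pvFlush [] (some n) b := by
  simp only [pvFlush]
  split_ifs <;> simp

-- ---- A = pvSpec ----

def pvFinish (st : List (List (String × String)) × Option String × List String) :
    List (List (String × String)) :=
  pvFlush st.1 st.2.1 st.2.2

theorem pvRunA_some (ls : List String) :
    ∀ (E : List (List (String × String))) (n : String) (cur : List String),
      pvFinish (ls.foldl pvStepA (E, some n, cur)) =
        pvFlush E (some n) (cur ++ ls.takeWhile (fun x => !pvIsHeader x)) ++ pvSpec ls := by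
  induction ls with
  | nil => intro E n cur; simp [pvSpec, pvFinish]
  | cons l ls ih =>
    intro E n cur
    by_cases h : pvIsHeader l = true
    · simp only [List.foldl_cons, pvStepA, h, if_true, List.takeWhile_cons, Bool.not_true,
        Bool.false_eq_true, if_false, List.append_nil, pvSpec]
      rw [ih]
      rw [pvFlush_append (pvFlush E (some n) cur), pvFlush_append E, List.append_assoc,
        List.append_assoc]
      simp
    · simp only [Bool.not_eq_true] at h
      simp only [List.foldl_cons, pvStepA, h, Bool.false_eq_true, if_false, pvSpec,
        List.takeWhile_cons, Bool.not_false, if_true, List.nil_append]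
      rw [ih]
      simp [List.append_assoc]

theorem pvRunA_none (ls : List String) :
    ∀ (E : List (List (String × String))) (cur : List String),
      pvFinish (ls.foldl pvStepA (E, none, cur)) = E ++ pvSpec ls := by
  induction ls with
  | nil => intro E cur; simp [pvFlush, pvSpec, pvFinish]
  | cons l ls ih =>
    intro E cur
    by_cases h : pvIsHeader l = true
    · simp only [List.foldl_cons, pvStepA, h, if_true, pvFlush, pvSpec]
      rw [pvRunA_some, pvFlush_append E]
      simp [pvFlush]
    · simp only [Bool.not_eq_true] at h
      simp only [List.foldl_cons, pvStepA, h, Bool.false_eq_true, if_false, pvSpec]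
      rw [ih]
      simp

theorem pvA_eq_pvSpec (content : String) :
    parse_knowledge_entries_py content = pvSpec (PySem.Str.splitlines content) := by
  have := pvRunA_none (PySem.Str.splitlines content) [] []
  simpa [parse_knowledge_entries_py, pvFinish] using this

-- ---- B = pvSpec ----

-- Nat-indexed mirror of pvHeads
def pvHeadsN : List String → List (Nat × String)
  | [] => []
  | l :: ls =>
    (if pvIsHeader l then [(0, pvName l)] else []) ++
      (pvHeadsN ls).map (fun p => (p.1 + 1, p.2))

theorem pvEnumerate_shift {α : Type} (xs : List α) :
    ∀ s : Int, PySem.List.enumerate xs (s + 1) =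
      (PySem.List.enumerate xs s).map (fun p => (p.1 + 1, p.2)) := by
  induction xs with
  | nil => intro s; simp [PySem.List.enumerate_nil]
  | cons x xs ih => intro s; simp [PySem.List.enumerate_cons, ih]

theorem pvHeads_eq_map (ls : List String) :
    pvHeads ls = (pvHeadsN ls).map (fun p => ((p.1 : Int), p.2)) := by
  induction ls with
  | nil => simp [pvHeads, pvHeadsN, PySem.List.enumerate_nil]
  | cons l ls ih =>
    simp only [pvHeads, PySem.List.enumerate_cons, List.filterMap_cons, pvHeadsN]
    rw [pvEnumerate_shift ls 0, List.filterMap_map]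
    by_cases h : pvIsHeader l = true
    · simp only [h, if_true]
      rw [show (PySem.List.enumerate ls 0).filterMap
            ((fun p => if pvIsHeader p.2 then some (p.1, pvName p.2) else none) ∘
              (fun p : Int × String => (p.1 + 1, p.2))) =
          (pvHeads ls).map (fun p => (p.1 + 1, p.2)) from ?_, ih]
      · simp [Function.comp, List.map_map]
      · simp only [pvHeads, List.map_filterMap]
        apply List.filterMap_congr
        intro p _
        simp only [Function.comp]
        split_ifs <;> simp
    · simp only [Bool.not_eq_true] at h
      simp only [h, Bool.false_eq_true, if_false, List.nil_append]
      rw [show (PySem.List.enumerate ls 0).filterMap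
            ((fun p => if pvIsHeader p.2 then some (p.1, pvName p.2) else none) ∘
              (fun p : Int × String => (p.1 + 1, p.2))) =
          (pvHeads ls).map (fun p => (p.1 + 1, p.2)) from ?_, ih]
      · simp [List.map_map]
      · simp only [pvHeads, List.map_filterMap]
        apply List.filterMap_congr
        intro p _
        simp only [Function.comp]
        split_ifs <;> simp

-- the body-emitting function of pvCollectB, Nat-indexed
def pvGN (lines : List String) (p : (Nat × String) × Nat) : List (List (String × String)) :=
  if p.1.2 ≠ "" ∧ p.1.1 + 1 < p.2 then
    [pvEntry p.1.2 ((lines.drop (p.1.1 + 1)).take (p.2 - (p.1.1 + 1)))]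
  else []

def pvBN (lines : List String) : List (List (String × String)) :=
  ((pvHeadsN lines).zip (((pvHeadsN lines).map (·.1)).drop 1 ++ [lines.length])).flatMap
    (pvGN lines)

theorem pvCollectB_eq_pvBN (lines : List String) : pvCollectB lines = pvBN lines := by
  simp only [pvCollectB, pvBN, pvHeads_eq_map]
  rw [show ((pvHeadsN lines).map (fun p => ((p.1 : Int), p.2))).map (·.1) =
      ((pvHeadsN lines).map (·.1)).map (fun n : Nat => (n : Int)) by simp [List.map_map]]
  rw [← List.map_drop, show [(lines.length : Int)] =
      ([lines.length] : List Nat).map (fun n : Nat => (n : Int)) by simp, ← List.map_append,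
    List.zip_map, List.flatMap_map]
  apply List.flatMap_congr
  intro p _
  simp only [Prod.map, pvGN]
  rw [show ((p.1.1 : Int), p.1.2).2 = p.1.2 from rfl]
  by_cases hc : p.1.2 ≠ "" ∧ p.1.1 + 1 < p.2
  · have hci : ((p.1.1 : Int)) + 1 < (p.2 : Int) := by exact_mod_cast hc.2
    rw [if_pos ⟨hc.1, hci⟩, if_pos hc,
      show ((p.1.1 : Int), p.1.2).1 + 1 = ((p.1.1 + 1 : Nat) : Int) by push_cast; ring,
      PySem.List.slice_natCast]
  · rw [if_neg (fun hcc => hc ⟨hcc.1, by exact_mod_cast hcc.2⟩), if_neg hc]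

-- shifting every index by one and prepending a line leaves the emitted entries unchanged
theorem pvGN_shift (l : String) (ls : List String) (h : List (Nat × String)) :
    ∀ bnds : List Nat,
      ((h.map (fun p => (p.1 + 1, p.2))).zip (bnds.map (· + 1))).flatMap (pvGN (l :: ls)) =
        (h.zip bnds).flatMap (pvGN ls) := by
  intro bnds
  rw [List.zip_map, List.flatMap_map]
  apply List.flatMap_congr
  intro p _
  simp only [Prod.map, pvGN]
  have harith : p.2 + 1 - (p.1.1 + 1 + 1) = p.2 - (p.1.1 + 1) := by omega
  have hcond : (p.1.2 ≠ "" ∧ p.1.1 + 1 + 1 < p.2 + 1) ↔ (p.1.2 ≠ "" ∧ p.1.1 + 1 < p.2) := by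
    constructor <;> (intro ⟨a, b⟩; exact ⟨a, by omega⟩)
  rw [if_congr hcond ?_ rfl]
  rw [show (l :: ls).drop (p.1.1 + 1 + 1) = ls.drop (p.1.1 + 1) from rfl, harith]

theorem pvHeadsN_nil_takeWhile (ls : List String) (h : pvHeadsN ls = []) :
    ls.takeWhile (fun x => !pvIsHeader x) = ls := by
  induction ls with
  | nil => rfl
  | cons l ls ih =>
    by_cases hl : pvIsHeader l = true
    · simp [pvHeadsN, hl] at h
    · simp only [Bool.not_eq_true] at hl
      simp only [pvHeadsN, hl, Bool.false_eq_true, if_false, List.nil_append,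
        List.map_eq_nil_iff] at h
      simp [hl, ih h]

theorem pvHeadsN_head_takeWhile (ls : List String) :
    ∀ i0 n0 t, pvHeadsN ls = (i0, n0) :: t →
      i0 = (ls.takeWhile (fun x => !pvIsHeader x)).length := by
  induction ls with
  | nil => intro i0 n0 t h; simp [pvHeadsN] at h
  | cons l ls ih =>
    intro i0 n0 t h
    by_cases hl : pvIsHeader l = true
    · simp only [pvHeadsN, hl, if_true, List.cons_append, List.nil_append,
        List.cons.injEq, Prod.mk.injEq] at h
      simp [hl, ← h.1.1]
    · simp only [Bool.not_eq_true] at hl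
      simp only [pvHeadsN, hl, Bool.false_eq_true, if_false, List.nil_append] at h
      match hh : pvHeadsN ls with
      | [] => rw [hh] at h; simp at h
      | (j, m) :: t' =>
        rw [hh] at h
        simp only [List.map_cons, List.cons.injEq, Prod.mk.injEq] at h
        have := ih j m t' hh
        simp [hl, ← h.1.1, this]

theorem pvTake_takeWhile_length {α : Type} (p : α → Bool) (ls : List α) :
    ls.take (ls.takeWhile p).length = ls.takeWhile p :=
  (List.prefix_iff_eq_take.mp (List.takeWhile_prefix p)).symm

theorem pvBN_eq_pvSpec (ls : List String) : pvBN ls = pvSpec ls := by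
  induction ls with
  | nil => rfl
  | cons l ls ih =>
    by_cases hl : pvIsHeader l = true
    · -- header line: head contribution + shifted tail
      simp only [pvBN, pvHeadsN, hl, if_true, List.cons_append, List.nil_append,
        List.map_cons, List.drop_succ_cons, List.drop_zero, List.length_cons]
      rcases hh : pvHeadsN ls with _ | ⟨⟨i0, n0⟩, t'⟩
      · have htw := pvHeadsN_nil_takeWhile ls hh
        have hspec : pvSpec ls = [] := by rw [← ih]; simp [pvBN, hh]
        simp only [List.map_nil, List.nil_append, List.zip_cons_cons, List.zip_nil_right,
          List.flatMap_cons, List.flatMap_nil, List.append_nil]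
        simp only [pvSpec, hl, if_true, hspec, List.append_nil, htw]
        simp only [pvGN, pvFlush, List.drop_succ_cons, List.drop_zero]
        by_cases hc : pvName l ≠ "" ∧ ls ≠ []
        · rw [if_pos ⟨hc.1, by have := List.length_pos_iff.mpr hc.2; omega⟩, if_pos hc]
          simp [List.take_of_length_le]
        · rw [if_neg ?_, if_neg hc]
          intro hcc
          exact hc ⟨hcc.1, by
            intro he
            subst he
            simp at hcc⟩
      · have hi0 := pvHeadsN_head_takeWhile ls i0 n0 t' hh
        have hspec : (((i0, n0) :: t').zip ((t'.map (·.1)) ++ [ls.length])).flatMap (pvGN ls) =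
            pvSpec ls := by rw [← ih]; simp [pvBN, hh]
        simp only [List.map_cons, List.cons_append, List.zip_cons_cons, List.flatMap_cons]
        rw [show ((t'.map (fun p : Nat × String => (p.1 + 1, p.2))).map (fun x => x.1)) ++
              [ls.length + 1] =
            ((t'.map (·.1)) ++ [ls.length]).map (· + 1) by simp [List.map_map]]
        rw [show ((i0 + 1, n0) :: t'.map (fun p : Nat × String => (p.1 + 1, p.2))) =
            ((i0, n0) :: t').map (fun p => (p.1 + 1, p.2)) by simp]
        rw [pvGN_shift l ls ((i0, n0) :: t') ((t'.map (·.1)) ++ [ls.length]), hspec]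
        simp only [pvSpec, hl, if_true]
        rw [hi0]
        have hhead : pvGN (l :: ls) ((0, pvName l),
              (ls.takeWhile (fun x => !pvIsHeader x)).length + 1) =
            pvFlush [] (some (pvName l)) (ls.takeWhile (fun x => !pvIsHeader x)) := by
          simp only [pvGN, pvFlush, List.drop_succ_cons, List.drop_zero]
          by_cases hc : pvName l ≠ "" ∧ ls.takeWhile (fun x => !pvIsHeader x) ≠ []
          · have hlen : 0 < (ls.takeWhile (fun x => !pvIsHeader x)).length :=
              List.length_pos_iff.mpr hc.2
            rw [if_pos ⟨hc.1, by omega⟩, if_pos hc,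
              show (ls.takeWhile (fun x => !pvIsHeader x)).length + 1 - (0 + 1) =
                (ls.takeWhile (fun x => !pvIsHeader x)).length by omega,
              pvTake_takeWhile_length, List.nil_append]
          · rw [if_neg ?_, if_neg hc]
            intro hcc
            exact hc ⟨hcc.1, List.length_pos_iff.mp (by omega)⟩
        rw [hhead]
    · -- non-header line: everything shifts by one
      simp only [Bool.not_eq_true] at hl
      simp only [pvBN, pvHeadsN, hl, Bool.false_eq_true, if_false, List.nil_append,
        List.length_cons]
      rw [show ((pvHeadsN ls).map (fun p => (p.1 + 1, p.2))).map (·.1) =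
          ((pvHeadsN ls).map (·.1)).map (· + 1) by simp [List.map_map]]
      rw [← List.map_drop, show [ls.length + 1] = ([ls.length] : List Nat).map (· + 1) by simp,
        ← List.map_append, pvGN_shift l ls (pvHeadsN ls)]
      rw [show (((pvHeadsN ls).zip (((pvHeadsN ls).map (·.1)).drop 1 ++ [ls.length])).flatMap
          (pvGN ls)) = pvBN ls from rfl, ih]
      simp [pvSpec, hl]

-- ===== VERDICT (by name: the statement is the Claim_ definition above) =====
theorem parse_knowledge_entries_py_spec : Claim_equal_parse_knowledge_entries_py := by
  intro content _
  unfold Spec_parse_knowledge_entries_py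
  rw [pvA_eq_pvSpec, parse_knowledge_entries_py_alt, pvCollectB_eq_pvBN, pvBN_eq_pvSpec]
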